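-- pv_equiv track=rewrite | github.com/Guernesey/utonextdns | update_lists.py | collapse_subdomains
-- ===== SOURCE A (Python) =====
-- from typing import Any, Iterable, Mapping
--
-- def collapse_subdomains(domains: Iterable[str]) -> list[str]:
--     unique_domains = set(domains)
--     ordered = sorted(unique_domains, key=lambda domain: (domain.count("."), domain))
--
--     kept: set[str] = set()
--     for domain in ordered:
--         labels = domain.split(".")
--         skip = False
--         for i in range(1, len(labels)):
--             parent = ".".join(labels[i:])
--             if parent in kept:
--                 skip = True
--                 break
--         if not skip:
--             kept.add(domain)
--
--     return sorted(kept)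
-- ===== SOURCE B (Python) =====
-- def _blocked(unique, rest):
--     # walk d's proper dot-suffixes by repeatedly cutting at the first '.'
--     i = rest.find(".")
--     while i >= 0:
--         rest = rest[i + 1:]
--         if rest in unique:
--             return True
--         i = rest.find(".")
--     return False
--
-- def collapse_subdomains(domains):
--     unique = set(domains)
--     out = [d for d in unique if not _blocked(unique, d)]
--     out.sort()
--     return out
-- ===== Notes on version B (the rewrite author's own statement) =====
-- stated objective: simpler
-- what changed: B drops A's sort-by-depth pass and the incrementally built 'kept' set: for each unique domain it walks the proper dot-suffixes directly on the string (cut at the first '.' with find/slicing, test membership in the full unique set), with no label splitting/joining, and sorts the survivors once.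
import Mathlib
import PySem

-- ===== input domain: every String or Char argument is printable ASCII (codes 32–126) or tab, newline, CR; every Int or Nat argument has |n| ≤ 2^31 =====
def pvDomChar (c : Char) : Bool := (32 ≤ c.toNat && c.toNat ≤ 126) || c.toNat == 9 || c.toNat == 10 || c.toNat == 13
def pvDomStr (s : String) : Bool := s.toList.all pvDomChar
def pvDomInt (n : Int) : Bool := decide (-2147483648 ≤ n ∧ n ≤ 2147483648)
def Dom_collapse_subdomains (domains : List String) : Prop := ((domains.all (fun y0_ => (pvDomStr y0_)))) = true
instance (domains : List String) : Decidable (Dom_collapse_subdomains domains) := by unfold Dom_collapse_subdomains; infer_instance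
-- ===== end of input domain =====

-- B drops A's depth-sort and running 'kept' set: for each unique domain it walks the proper
-- dot-suffixes directly on the string (cut at the first '.', test against the full unique set),
-- no label split/join, then sorts the survivors once (objective: simpler).

-- ===== PORT A =====
-- loop body of A's 'for domain in ordered' (checks parents against the incrementally built 'kept')
def aStep (kept : PySem.Set String) (domain : String) : PySem.Set String :=
  let labels := (PySem.Str.split? domain ".").getD []
  let skip := (PySem.List.pyRange 1 (labels.length : Int)).any fun i =>
    PySem.Set.contains kept (PySem.Str.join "." (PySem.List.slice labels (some i) none))
  if skip then kept else PySem.Set.add kept domain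

def collapse_subdomains (domains : List String) : List String :=
  let unique : PySem.Set String := PySem.Set.ofList domains
  let ordered := PySem.List.sorted2 unique (fun d => PySem.Str.count d ".") (fun d => d)
  let kept := ordered.foldl aStep PySem.Set.empty
  PySem.List.sorted kept (fun x => x)

-- ===== PORT B =====
-- termination of B's while loop: cutting at the first '.' strictly shortens the string
theorem bTail_len_lt (rest : String) (h : ¬ PySem.Str.find rest "." < 0) :
    (PySem.Str.slice rest (some (PySem.Str.find rest "." + 1)) none).toList.length
      < rest.toList.length := by
  have h0 : 0 ≤ PySem.Chars.find rest.toList ['.'] := by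
    simpa [PySem.Str.find_eq] using not_lt.1 h
  have hinfix : ['.'] <:+: rest.toList := (PySem.Chars.find_nonneg_iff _ _).1 h0
  have hlen : 1 ≤ rest.toList.length := by
    have := hinfix.length_le; simpa using this
  rw [PySem.Str.toList_slice, PySem.Chars.slice_eq_listSlice, PySem.Str.find_eq]
  have hsep : (".".toList) = ['.'] := rfl
  rw [hsep]
  rw [PySem.List.slice_from _ (by omega : (0:Int) ≤ PySem.Chars.find rest.toList ['.'] + 1)]
  rw [List.length_drop]
  omega

-- B's helper: does some proper dot-suffix of rest lie in the full unique set? (the while loop)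
def bBlocked (U : PySem.Set String) (rest : String) : Bool :=
  let i := PySem.Str.find rest "."
  if h : i < 0 then false
  else
    PySem.Set.contains U (PySem.Str.slice rest (some (i + 1)) none)
      || bBlocked U (PySem.Str.slice rest (some (i + 1)) none)
termination_by rest.toList.length
decreasing_by exact bTail_len_lt rest h

def collapse_subdomains_alt (domains : List String) : List String :=
  let unique : PySem.Set String := PySem.Set.ofList domains
  let out := unique.filter (fun d => !bBlocked unique d)
  PySem.List.sorted out (fun x => x)

-- ===== PRECONDITION & SPEC =====
def Spec_collapse_subdomains (domains : List String) (out : List String) : Prop := out = collapse_subdomains_alt domains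
instance (domains : List String) (out : List String) : Decidable (Spec_collapse_subdomains domains out) := by unfold Spec_collapse_subdomains; infer_instance

-- ===== CLAIM (what is proved, stated in full; the proofs are below) =====
def Claim_equal_collapse_subdomains : Prop := ∀ (domains : List String), Dom_collapse_subdomains domains → Spec_collapse_subdomains domains (collapse_subdomains domains)

-- ===== LEMMAS AND PROOFS =====

-- ---- proof-side vocabulary ----
-- labels of a domain, at the character level
def dl (d : String) : List (List Char) := d.toList.splitOn '.'
-- the proper-suffix 'parent' obtained by dropping the first k labels
def par (d : String) (k : Nat) : String := String.ofList (PySem.Chars.join ['.'] ((dl d).drop k))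
-- 'some proper suffix of d is in S'
def badP (S : List String) (d : String) : Prop := ∃ k : Nat, 1 ≤ k ∧ k < (dl d).length ∧ par d k ∈ S

-- ---- splitOn / join / count algebra ----
theorem modifyHead_fun_id {α : Type} (l : List α) : List.modifyHead (fun x => x) l = l := by
  cases l <;> simp

theorem chars_splitOn_go_dot (l : List Char) : ∀ (fuel : Nat) (cur : List Char) (acc : List (List Char)),
    l.length < fuel →
    PySem.Chars.splitOn.go ['.'] fuel l cur acc
      = acc.reverse ++ (l.splitOn '.').modifyHead (cur.reverse ++ ·) := by
  induction l with
  | nil =>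
    intro fuel cur acc h
    cases fuel with
    | zero => omega
    | succ f =>
      simp [PySem.Chars.splitOn.go, List.splitOn]
  | cons c rest ih =>
    intro fuel cur acc h
    cases fuel with
    | zero => simp at h
    | succ f =>
      by_cases hc : c = '.'
      · subst hc
        rw [PySem.Chars.splitOn.go]
        simp only [List.isPrefixOf, BEq.rfl, Bool.true_and, if_true, List.length_cons, List.length_nil,
          List.drop_succ_cons, List.drop_zero, List.isPrefixOf_nil_left]
        rw [ih f [] (cur.reverse :: acc) (by simpa using Nat.lt_of_succ_lt_succ h)]
        simp [List.splitOn, List.splitOnP_cons, modifyHead_fun_id]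
      · rw [PySem.Chars.splitOn.go]
        have hpre : List.isPrefixOf ['.'] (c :: rest) = false := by
          simp [List.isPrefixOf]
          exact fun hcc => hc (by simpa using hcc.symm)
        rw [hpre, if_neg (by simp)]
        rw [ih f (c :: cur) acc (by simpa using Nat.lt_of_succ_lt_succ h)]
        simp only [List.splitOn, List.splitOnP_cons]
        rw [if_neg (by simp [hc])]
        rw [List.modifyHead_modifyHead]
        congr 1
        apply congrFun
        congr 1
        funext t
        simp

theorem chars_splitOn_dot (s : List Char) : PySem.Chars.splitOn s ['.'] = s.splitOn '.' := by
  rw [PySem.Chars.splitOn, chars_splitOn_go_dot s (s.length + 1) [] [] (by omega)]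
  simp [modifyHead_fun_id]

theorem chars_count_go_dot (l : List Char) : ∀ (fuel : Nat) (acc : Nat), l.length ≤ fuel →
    PySem.Chars.count.go ['.'] fuel l acc = acc + l.count '.' := by
  induction l with
  | nil =>
    intro fuel acc h
    cases fuel <;> simp [PySem.Chars.count.go]
  | cons c rest ih =>
    intro fuel acc h
    cases fuel with
    | zero => simp at h
    | succ f =>
      by_cases hc : c = '.'
      · subst hc
        rw [PySem.Chars.count.go]
        simp only [List.isPrefixOf, BEq.rfl, Bool.true_and, if_true, List.length_cons,
          List.length_nil, List.drop_succ_cons, List.drop_zero, List.isPrefixOf_nil_left]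
        rw [ih f (acc + 1) (by simpa using h)]
        simp [List.count_cons]
        omega
      · rw [PySem.Chars.count.go]
        have hpre : List.isPrefixOf ['.'] (c :: rest) = false := by
          simp [List.isPrefixOf]
          exact fun hcc => hc (by simpa using hcc.symm)
        rw [hpre, if_neg (by simp)]
        rw [ih f acc (by simpa using Nat.le_of_succ_le_succ h)]
        simp [List.count_cons, hc]

theorem str_count_dot (d : String) : PySem.Str.count d "." = d.toList.count '.' := by
  rw [PySem.Str.count_eq]
  show PySem.Chars.count d.toList ['.'] = _
  rw [PySem.Chars.count]
  rw [if_neg (by simp)]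
  rw [chars_count_go_dot d.toList d.toList.length 0 (le_refl _)]
  simp

theorem splitOnP_ne_nil' (p : Char → Bool) (l : List Char) : l.splitOnP p ≠ [] := by
  induction l with
  | nil => simp [List.splitOnP_nil]
  | cons c rest ih =>
    rw [List.splitOnP_cons]
    split_ifs
    · simp
    · cases h : rest.splitOnP p with
      | nil => exact absurd h ih
      | cons a t => simp [h]

theorem splitOn_ne_nil (l : List Char) : l.splitOn '.' ≠ [] := splitOnP_ne_nil' _ l

theorem splitOn_dot_free (l : List Char) : ∀ p ∈ l.splitOn '.', '.' ∉ p := by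
  induction l with
  | nil => intro p hp; simp [List.splitOn, List.splitOnP_nil] at hp; simp [hp]
  | cons c rest ih =>
    intro p hp
    simp only [List.splitOn, List.splitOnP_cons] at hp ih
    by_cases hc : c = '.'
    · rw [if_pos (by simp [hc])] at hp
      rcases List.mem_cons.1 hp with h | h
      · simp [h]
      · exact ih p h
    · rw [if_neg (by simp [hc])] at hp
      cases h : rest.splitOnP (· == '.') with
      | nil => exact absurd h (splitOnP_ne_nil' _ rest)
      | cons a t =>
        rw [h] at hp
        simp only [List.modifyHead] at hp
        rcases List.mem_cons.1 hp with h1 | h1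
        · subst h1
          intro hm
          rcases List.mem_cons.1 hm with h2 | h2
          · exact hc h2.symm
          · exact ih a (by simp [h]) h2
        · exact ih p (by rw [h]; exact List.mem_cons_of_mem _ h1)

theorem count_join_dot (ls : List (List Char)) (h : ∀ p ∈ ls, '.' ∉ p) (hne : ls ≠ []) :
    (PySem.Chars.join ['.'] ls).count '.' = ls.length - 1 := by
  induction ls with
  | nil => simp at hne
  | cons p rest ih =>
    cases rest with
    | nil =>
      rw [PySem.Chars.join_singleton]
      simp [List.count_eq_zero]
      exact h p (by simp)
    | cons q t =>
      rw [PySem.Chars.join_cons_cons]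
      rw [List.count_append, List.count_append]
      have h1 : p.count '.' = 0 := List.count_eq_zero.2 (h p (by simp))
      have h2 := ih (fun x hx => h x (by simp [List.mem_cons] at hx ⊢; tauto)) (by simp)
      simp [h1, h2, List.count_singleton]
      omega

theorem join_splitOn_dot (s : List Char) : PySem.Chars.join ['.'] (s.splitOn '.') = s :=
  List.intercalate_splitOn s '.'

theorem splitOn_join_dot (ls : List (List Char)) (h : ∀ p ∈ ls, '.' ∉ p) (hne : ls ≠ []) :
    (PySem.Chars.join ['.'] ls).splitOn '.' = ls :=
  List.splitOn_intercalate ls '.' h hne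

theorem str_split_dot (d : String) :
    (PySem.Str.split? d ".").getD [] = (dl d).map String.ofList := by
  have h := PySem.Str.split?_map d "."
  have h2 : PySem.Chars.split? d.toList ".".toList = some (dl d) := by
    show PySem.Chars.split? d.toList ['.'] = _
    rw [PySem.Chars.split?, if_neg (by simp), chars_splitOn_dot]; rfl
  rw [h2] at h
  cases hs : PySem.Str.split? d "." with
  | none => rw [hs] at h; simp at h
  | some l =>
    rw [hs] at h
    simp only [Option.map_some, Option.some_inj] at h
    simp only [Option.getD_some]
    rw [← h]
    simp [List.map_map, Function.comp_def]

theorem dl_par (d : String) (k : Nat) (hk : k < (dl d).length) :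
    dl (par d k) = (dl d).drop k := by
  show (String.ofList _).toList.splitOn '.' = _
  rw [String.toList_ofList]
  exact splitOn_join_dot _ (fun p hp => splitOn_dot_free d.toList p (List.mem_of_mem_drop hp))
    (by intro h; have := List.drop_eq_nil_iff.1 h; omega)

theorem par_par (d : String) (i j : Nat) (hi : i < (dl d).length) :
    par (par d i) j = par d (i + j) := by
  show String.ofList (PySem.Chars.join ['.'] ((dl (par d i)).drop j)) = _
  rw [dl_par d i hi, List.drop_drop]
  rfl

theorem cnt_eq (d : String) : d.toList.count '.' = (dl d).length - 1 := by
  conv_lhs => rw [← join_splitOn_dot d.toList]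
  exact count_join_dot _ (splitOn_dot_free d.toList) (splitOn_ne_nil d.toList)

theorem cnt_par_lt (d : String) (k : Nat) (h1 : 1 ≤ k) (hk : k < (dl d).length) :
    (par d k).toList.count '.' < d.toList.count '.' := by
  rw [cnt_eq, cnt_eq d, dl_par d k hk, List.length_drop]
  omega

-- ---- A's inner loop, characterised ----
theorem str_join_drop (d : String) (k : Nat) :
    PySem.Str.join "." (List.drop k ((dl d).map String.ofList)) = par d k := by
  rw [PySem.Str.join]
  show String.ofList (PySem.Chars.join ['.'] _) = _
  rw [← List.map_drop, List.map_map]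
  have : (String.toList ∘ String.ofList) = id := by funext l; simp
  rw [this, List.map_id]
  rfl

theorem skip_iff (S : PySem.Set String) (d : String) :
    ((PySem.List.pyRange 1 ((((PySem.Str.split? d ".").getD []).length : Nat) : Int)).any fun i =>
      PySem.Set.contains S (PySem.Str.join "." (PySem.List.slice ((PySem.Str.split? d ".").getD []) (some i) none))) = true
    ↔ badP S d := by
  rw [str_split_dot]
  rw [List.any_eq_true]
  constructor
  · rintro ⟨i, hi, hc⟩
    rw [PySem.List.mem_pyRange_one] at hi
    rw [PySem.Set.contains_iff] at hc
    refine ⟨i.toNat, by omega, by simp at hi ⊢; omega, ?_⟩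
    rw [PySem.List.slice_from _ (by omega : (0:Int) ≤ i), str_join_drop] at hc
    exact hc
  · rintro ⟨k, h1, hk, hmem⟩
    refine ⟨(k : Int), ?_, ?_⟩
    · rw [PySem.List.mem_pyRange_one]
      constructor
      · exact_mod_cast h1
      · simp at hk ⊢; exact_mod_cast hk
    · rw [PySem.Set.contains_iff]
      have hslice : PySem.List.slice ((dl d).map String.ofList) (some (k : Int)) none
          = List.drop k ((dl d).map String.ofList) := by
        have := PySem.List.slice_from ((dl d).map String.ofList) (a := (k : Int)) (by omega)
        simpa using this
      rw [hslice, str_join_drop]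
      exact hmem

theorem aStep_eq_of_bad (kept : PySem.Set String) (d : String) (h : badP kept d) :
    aStep kept d = kept := by
  simp only [aStep]
  rw [if_pos ((skip_iff kept d).2 h)]

theorem aStep_eq_of_not (kept : PySem.Set String) (d : String) (h : ¬ badP kept d) :
    aStep kept d = PySem.Set.add kept d := by
  simp only [aStep]
  rw [if_neg (fun hc => h ((skip_iff kept d).1 hc))]

-- ---- B's suffix walk, characterised ----
theorem singleton_infix_iff (a : Char) (l : List Char) : [a] <:+: l ↔ a ∈ l := by
  constructor
  · intro h
    exact (List.singleton_sublist).1 h.sublist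
  · intro h
    rcases List.append_of_mem h with ⟨s, t, rfl⟩
    exact ⟨s, t, by simp⟩

theorem find_first_dot (p t : List Char) (hp : '.' ∉ p) :
    PySem.Chars.find (p ++ '.' :: t) ['.'] = (p.length : Int) := by
  have hinf : ['.'] <:+: (p ++ '.' :: t) := (singleton_infix_iff _ _).2 (by simp)
  have h0 : 0 ≤ PySem.Chars.find (p ++ '.' :: t) ['.'] := (PySem.Chars.find_nonneg_iff _ _).2 hinf
  rcases PySem.Chars.find_spec h0 with ⟨hpre, hmin⟩
  set i := (PySem.Chars.find (p ++ '.' :: t) ['.']).toNat with hi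
  have hatp : ['.'] <+: List.drop p.length (p ++ '.' :: t) := by
    rw [List.drop_left]
    exact ⟨t, rfl⟩
  have hle : i ≤ p.length := by
    by_contra hgt
    exact hmin p.length (by omega) hatp
  have hnotlt : ¬ i < p.length := by
    intro hlt
    rcases hpre with ⟨u, hu⟩
    have hget : (List.drop i (p ++ '.' :: t))[0]? = some '.' := by
      rw [← hu]; rfl
    rw [List.getElem?_drop] at hget
    simp only [Nat.add_zero] at hget
    rw [List.getElem?_append_left hlt] at hget
    obtain ⟨hlt2, hEq⟩ := List.getElem?_eq_some_iff.1 hget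
    exact hp (hEq ▸ p.getElem_mem hlt2)
  have : i = p.length := by omega
  omega

theorem bBlocked_iff_aux (U : PySem.Set String) : ∀ (n : Nat) (d : String),
    d.toList.length ≤ n → (bBlocked U d = true ↔ badP U d) := by
  intro n
  induction n with
  | zero =>
    intro d hd
    have hnil : d.toList = [] := List.eq_nil_of_length_eq_zero (by omega)
    have hfind : PySem.Str.find d "." < 0 := by
      rw [PySem.Str.find_eq]
      show PySem.Chars.find d.toList ['.'] < 0
      have : PySem.Chars.find d.toList ['.'] = -1 := by
        rw [PySem.Chars.find_eq_neg_one_iff]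
        rw [hnil]
        intro h
        have := (singleton_infix_iff '.' []).1 h
        simp at this
      omega
    rw [bBlocked]
    rw [dif_pos hfind]
    constructor
    · intro h; simp at h
    rintro ⟨k, h1, h2, _⟩
    exfalso
    have : (dl d).length = 1 := by
      have hc := cnt_eq d
      have : d.toList.count '.' = 0 := by rw [hnil]; simp
      have hne := splitOn_ne_nil d.toList
      have : (dl d).length ≥ 1 := List.length_pos_of_ne_nil hne
      omega
    omega
  | succ n ih =>
    intro d hd
    by_cases hfind : PySem.Str.find d "." < 0
    · -- no dot: bBlocked = false, and (dl d).length = 1 so badP is false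
      rw [bBlocked, dif_pos hfind]
      constructor
      · intro h; simp at h
      rintro ⟨k, h1, h2, _⟩
      exfalso
      have hnotin : '.' ∉ d.toList := by
        intro hmem
        have : ['.'] <:+: d.toList := (singleton_infix_iff _ _).2 hmem
        have := (PySem.Chars.find_nonneg_iff d.toList ['.']).2 this
        rw [PySem.Str.find_eq] at hfind
        have : PySem.Chars.find d.toList ['.'] < 0 := hfind
        omega
      have hc0 : d.toList.count '.' = 0 := List.count_eq_zero.2 hnotin
      have hc := cnt_eq d
      have hne := splitOn_ne_nil d.toList
      have hge : (dl d).length ≥ 1 := List.length_pos_of_ne_nil hne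
      omega
    · -- dot present
      have h0 : 0 ≤ PySem.Chars.find d.toList ['.'] := by
        rw [PySem.Str.find_eq] at hfind
        have : ¬ PySem.Chars.find d.toList ['.'] < 0 := hfind
        omega
      -- decompose the labels of d
      obtain ⟨p, ps, hdl⟩ : ∃ p ps, dl d = p :: ps := by
        cases h : dl d with
        | nil => exact absurd h (splitOn_ne_nil d.toList)
        | cons a b => exact ⟨a, b, rfl⟩
      obtain ⟨q, t, hps⟩ : ∃ q t, ps = q :: t := by
        cases h : ps with
        | nil =>
          exfalso
          have hinf : ['.'] <:+: d.toList := (PySem.Chars.find_nonneg_iff _ _).1 h0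
          have hmem : '.' ∈ d.toList := (singleton_infix_iff _ _).1 hinf
          have hcnt : d.toList.count '.' ≥ 1 := List.one_le_count_iff.2 hmem
          have := cnt_eq d
          rw [hdl, h] at this
          simp at this
          omega
        | cons a b => exact ⟨a, b, rfl⟩
      subst hps
      have hJ : d.toList = p ++ '.' :: PySem.Chars.join ['.'] (q :: t) := by
        conv_lhs => rw [← join_splitOn_dot d.toList]
        show PySem.Chars.join ['.'] (dl d) = _
        rw [hdl, PySem.Chars.join_cons_cons]
        simp
      have hpfree : '.' ∉ p := splitOn_dot_free d.toList p (by show p ∈ dl d; rw [hdl]; simp)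
      have hfindval : PySem.Chars.find d.toList ['.'] = (p.length : Int) := by
        rw [hJ]; exact find_first_dot p _ hpfree
      -- the tail string is par d 1
      have htail : (PySem.Str.slice d (some (PySem.Str.find d "." + 1)) none) = par d 1 := by
        have htl : (PySem.Str.slice d (some (PySem.Str.find d "." + 1)) none).toList
            = PySem.Chars.join ['.'] (q :: t) := by
          rw [PySem.Str.toList_slice, PySem.Chars.slice_eq_listSlice, PySem.Str.find_eq]
          show PySem.List.slice d.toList (some (PySem.Chars.find d.toList ['.'] + 1)) none = _
          rw [hfindval]
          rw [PySem.List.slice_from _ (by omega : (0:Int) ≤ (p.length : Int) + 1)]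
          rw [hJ]
          have : ((p.length : Int) + 1).toNat = p.length + 1 := by omega
          rw [this]
          rw [show p.length + 1 = p.length + 1 from rfl]
          rw [← List.drop_drop]
          rw [List.drop_left]
          simp
        have hpar1 : par d 1 = String.ofList (PySem.Chars.join ['.'] (q :: t)) := by
          rw [par, hdl]
          simp
        rw [hpar1, ← htl, String.ofList_toList]
      have hlt : (PySem.Str.slice d (some (PySem.Str.find d "." + 1)) none).toList.length
          < d.toList.length := bTail_len_lt d hfind
      have hih := ih (par d 1) (by rw [← htail]; omega)
      have hdllen : 1 < (dl d).length := by rw [hdl]; simp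
      have hdltail : dl (par d 1) = q :: t := by
        rw [dl_par d 1 hdllen, hdl]; rfl
      -- unfold one step of bBlocked
      rw [bBlocked, dif_neg hfind]
      rw [htail]
      rw [Bool.or_eq_true, PySem.Set.contains_iff, hih]
      -- badP shift
      constructor
      · rintro (hmem | ⟨k, hk1, hk2, hkm⟩)
        · exact ⟨1, le_refl 1, hdllen, hmem⟩
        · refine ⟨1 + k, by omega, ?_, ?_⟩
          · rw [hdltail] at hk2
            rw [hdl] at *
            simp at hk2 ⊢
            omega
          · rw [← par_par d 1 k hdllen]
            exact hkm
      · rintro ⟨k, hk1, hk2, hkm⟩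
        rcases Nat.eq_or_lt_of_le hk1 with h1 | h1
        · left; rw [← h1] at hkm; exact hkm
        · right
          refine ⟨k - 1, by omega, ?_, ?_⟩
          · rw [hdltail]
            rw [hdl] at hk2
            simp at hk2 ⊢
            omega
          · rw [par_par d 1 (k - 1) hdllen]
            have : 1 + (k - 1) = k := by omega
            rw [this]
            exact hkm

theorem bBlocked_iff (U : PySem.Set String) (d : String) :
    bBlocked U d = true ↔ badP U d :=
  bBlocked_iff_aux U d.toList.length d (le_refl _)

-- ---- order: sorted2 is non-decreasing in its first key ----
theorem insertBy_pairwise_k1 {α κ : Type} [LinearOrder κ] (key : α → κ) (before : α → α → Bool)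
    (h1 : ∀ a b, before a b = true → key a ≤ key b) (h2 : ∀ a b, before a b = false → key b ≤ key a)
    (x : α) (ys : List α) (hp : ys.Pairwise (fun a b => key a ≤ key b)) :
    (PySem.List.insertBy before x ys).Pairwise (fun a b => key a ≤ key b) := by
  induction ys with
  | nil => simp [PySem.List.insertBy]
  | cons y ys ih =>
    rw [PySem.List.insertBy]
    rcases List.pairwise_cons.1 hp with ⟨hy, hys⟩
    by_cases hb : before x y = true
    · rw [if_pos hb]
      refine List.pairwise_cons.2 ⟨?_, hp⟩
      intro z hz
      rcases List.mem_cons.1 hz with h | h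
      · exact h ▸ h1 x y hb
      · exact le_trans (h1 x y hb) (hy z h)
    · rw [if_neg hb]
      refine List.pairwise_cons.2 ⟨?_, ih hys⟩
      intro z hz
      rcases (PySem.List.insertBy_mem_iff before x z ys).1 hz with h | h
      · exact h ▸ h2 x y (by simpa using hb)
      · exact hy z h

theorem foldl_insertBy_pairwise {α κ : Type} [LinearOrder κ] (key : α → κ) (before : α → α → Bool)
    (h1 : ∀ a b, before a b = true → key a ≤ key b) (h2 : ∀ a b, before a b = false → key b ≤ key a)
    (xs : List α) : ∀ (acc : List α), acc.Pairwise (fun a b => key a ≤ key b) →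
    (xs.foldl (fun acc x => PySem.List.insertBy before x acc) acc).Pairwise (fun a b => key a ≤ key b) := by
  induction xs with
  | nil => intro acc h; simpa using h
  | cons x xs ih =>
    intro acc h
    exact ih _ (insertBy_pairwise_k1 key before h1 h2 x acc h)

theorem sorted2_pairwise_k1 {α κ₂ : Type} [LinearOrder κ₂] (xs : List α) (k1 : α → Nat) (k2 : α → κ₂)
    [DecidableLT κ₂] :
    (PySem.List.sorted2 xs k1 k2).Pairwise (fun a b => k1 a ≤ k1 b) := by
  rw [PySem.List.sorted2]
  refine foldl_insertBy_pairwise k1 _ ?_ ?_ xs [] (by simp)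
  · intro a b hb
    simp only [if_neg (by simp : ¬ (false = true))] at hb
    simp only [Bool.or_eq_true, decide_eq_true_eq, Bool.and_eq_true, Bool.not_eq_true',
      decide_eq_false_iff_not] at hb
    rcases hb with h | ⟨h, _⟩
    · omega
    · omega
  · intro a b hb
    simp only [if_neg (by simp : ¬ (false = true))] at hb
    simp only [Bool.or_eq_false_iff, decide_eq_false_iff_not, Bool.and_eq_false_iff] at hb
    omega

-- ---- A's fold, characterised ----
theorem fold_nodup (todo : List String) : ∀ (kept : PySem.Set String), kept.Nodup →
    (todo.foldl aStep kept).Nodup := by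
  induction todo with
  | nil => intro kept h; simpa using h
  | cons d rest ih =>
    intro kept h
    rw [List.foldl_cons]
    refine ih _ ?_
    by_cases hb : badP kept d
    · rwa [aStep_eq_of_bad kept d hb]
    · rw [aStep_eq_of_not kept d hb]
      exact PySem.Set.nodup_add kept d h

-- the loop invariant of A's main 'for' loop
theorem fold_inv (U L : List String) (hLU : ∀ x, x ∈ L ↔ x ∈ U)
    (hnd : L.Nodup) (hpw : L.Pairwise (fun a b => a.toList.count '.' ≤ b.toList.count '.')) :
    ∀ (todo done : List String) (kept : PySem.Set String), L = done ++ todo →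
    (∀ x ∈ kept, x ∈ done) →
    (∀ p ∈ done, (p ∈ kept ↔ ¬ badP U p)) →
    (∀ p ∈ done, ∃ t ∈ kept, t = p ∨ ∃ k : Nat, 1 ≤ k ∧ k < (dl p).length ∧ t = par p k) →
    (∀ x ∈ todo.foldl aStep kept, x ∈ L) ∧
    (∀ p ∈ L, (p ∈ todo.foldl aStep kept ↔ ¬ badP U p)) := by
  intro todo
  induction todo with
  | nil =>
    intro done kept hL h1 h2 h3
    rw [List.append_nil] at hL
    subst hL
    exact ⟨fun x hx => h1 x hx, fun p hp => h2 p hp⟩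
  | cons d rest ih =>
    intro done kept hL h1 h2 h3
    rw [List.foldl_cons]
    have hdL : d ∈ L := by rw [hL]; exact List.mem_append_right _ (by simp)
    have hdonesub : ∀ x ∈ done, x ∈ L := fun x hx => by rw [hL]; exact List.mem_append_left _ hx
    have hdnotdone : d ∉ done := by
      have hnd2 := hnd
      rw [hL] at hnd2
      rcases List.nodup_append.1 hnd2 with ⟨_, _, hdisj⟩
      intro hd
      exact hdisj d hd d (by simp) rfl
    have hbadiff : badP kept d ↔ badP U d := by
      constructor
      · rintro ⟨k, hk1, hk2, hkm⟩
        exact ⟨k, hk1, hk2, (hLU _).1 (hdonesub _ (h1 _ hkm))⟩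
      · rintro ⟨k, hk1, hk2, hkm⟩
        have hpL : par d k ∈ L := (hLU _).2 hkm
        have hcnt := cnt_par_lt d k hk1 hk2
        have hpdone : par d k ∈ done := by
          rw [hL] at hpL
          rcases List.mem_append.1 hpL with h | h
          · exact h
          · exfalso
            have hpw2 := hpw
            rw [hL] at hpw2
            have hdr := (List.pairwise_append.1 hpw2).2.1
            rcases List.mem_cons.1 h with he | he
            · rw [he] at hcnt; omega
            · have := (List.pairwise_cons.1 hdr).1 _ he
              omega
        rcases h3 _ hpdone with ⟨t, htk, ht⟩
        rcases ht with rfl | ⟨m, hm1, hm2, rfl⟩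
        · exact ⟨k, hk1, hk2, htk⟩
        · rw [dl_par d k hk2, List.length_drop] at hm2
          refine ⟨k + m, by omega, by omega, ?_⟩
          rwa [par_par d k m hk2] at htk
    have hLnext : L = (done ++ [d]) ++ rest := by rw [hL, List.append_assoc]; rfl
    by_cases hbad : badP U d
    · rw [aStep_eq_of_bad kept d (hbadiff.2 hbad)]
      refine ih (done ++ [d]) kept hLnext ?_ ?_ ?_
      · exact fun x hx => List.mem_append_left _ (h1 x hx)
      · intro p hp
        rcases List.mem_append.1 hp with h | h
        · exact h2 p h
        · have hpd : p = d := by simpa using h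
          subst hpd
          constructor
          · intro hk; exact absurd (h1 p hk) hdnotdone
          · intro hnb; exact absurd hbad hnb
      · intro p hp
        rcases List.mem_append.1 hp with h | h
        · exact h3 p h
        · have hpd : p = d := by simpa using h
          subst hpd
          rcases hbadiff.2 hbad with ⟨k, hk1, hk2, hkm⟩
          exact ⟨par p k, hkm, Or.inr ⟨k, hk1, hk2, rfl⟩⟩
    · rw [aStep_eq_of_not kept d (fun hb => hbad (hbadiff.1 hb))]
      refine ih (done ++ [d]) (PySem.Set.add kept d) hLnext ?_ ?_ ?_
      · intro x hx
        rcases (PySem.Set.mem_add kept d x).1 hx with h | h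
        · exact List.mem_append_left _ (h1 x h)
        · exact List.mem_append_right _ (by simp [h])
      · intro p hp
        rcases List.mem_append.1 hp with h | h
        · rw [PySem.Set.mem_add]
          constructor
          · rintro (hk | rfl)
            · exact (h2 p h).1 hk
            · exact absurd h hdnotdone
          · intro hnb; exact Or.inl ((h2 p h).2 hnb)
        · have hpd : p = d := by simpa using h
          subst hpd
          constructor
          · intro _; exact hbad
          · intro _; exact (PySem.Set.mem_add kept p p).2 (Or.inr rfl)
      · intro p hp
        rcases List.mem_append.1 hp with h | h
        · rcases h3 p h with ⟨t, htk, ht⟩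
          exact ⟨t, (PySem.Set.mem_add kept d t).2 (Or.inl htk), ht⟩
        · have hpd : p = d := by simpa using h
          subst hpd
          exact ⟨p, (PySem.Set.mem_add kept p p).2 (Or.inr rfl), Or.inl rfl⟩

theorem keptA_mem (domains : List String) (x : String) :
    x ∈ (PySem.List.sorted2 (PySem.Set.ofList domains) (fun d => PySem.Str.count d ".") (fun d => d)).foldl aStep PySem.Set.empty
    ↔ x ∈ PySem.Set.ofList domains ∧ ¬ badP (PySem.Set.ofList domains) x := by
  set U := PySem.Set.ofList domains with hU
  set L := PySem.List.sorted2 U (fun d => PySem.Str.count d ".") (fun d => d) with hL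
  have hperm : L.Perm U := PySem.List.sorted2_perm U _ _ false
  have hLU : ∀ y, y ∈ L ↔ y ∈ U := fun y => hperm.mem_iff
  have hnd : L.Nodup := hperm.nodup_iff.2 (PySem.Set.nodup_ofList domains)
  have hpw : L.Pairwise (fun a b => a.toList.count '.' ≤ b.toList.count '.') := by
    have := sorted2_pairwise_k1 U (fun d => PySem.Str.count d ".") (fun d => d)
    refine this.imp ?_
    intro a b h
    rwa [str_count_dot, str_count_dot] at h
  have := fold_inv U L hLU hnd hpw L [] PySem.Set.empty (by simp) (by simp [PySem.Set.empty])
    (by simp) (by simp)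
  constructor
  · intro hx
    have hxL := this.1 x hx
    exact ⟨(hLU x).1 hxL, ((this.2 x hxL).1 hx)⟩
  · rintro ⟨hxU, hnb⟩
    exact (this.2 x ((hLU x).2 hxU)).2 hnb

-- ===== VERDICT (by name: the statement is the Claim_ definition above) =====
theorem collapse_subdomains_spec : Claim_equal_collapse_subdomains := by
  intro domains _
  show collapse_subdomains domains = collapse_subdomains_alt domains
  simp only [collapse_subdomains, collapse_subdomains_alt]
  apply PySem.List.sorted_eq_sorted_of_perm _ _ (fun x => x) (fun a b h => h)
  refine (List.perm_ext_iff_of_nodup (fold_nodup _ _ (by simp [PySem.Set.empty]))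
    ((PySem.Set.nodup_ofList domains).filter _)).2 ?_
  intro a
  have key : ((!bBlocked (PySem.Set.ofList domains) a) = true) ↔ ¬ badP (PySem.Set.ofList domains) a := by
    rw [← bBlocked_iff (PySem.Set.ofList domains) a]
    simp
  rw [keptA_mem, List.mem_filter]
  exact and_congr Iff.rfl key.symm
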